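-- pv_equiv track=rewrite | github.com/JaehoonSong12/columbia_academy | async-ap/q29.py | maxSpan
-- ===== SOURCE A (Python) =====
-- def maxSpan(nums: list[int]) -> int:
--     """
--     Description:
--         Consider the leftmost and rightmost appearances of some value in an array.
--         We'll say that the "span" is the number of elements between the two, inclusive.
--         A single occurrence of a value has a span of 1.
--         Return the largest span found in the given array.
--         Note: Efficiency is not a priority.
--
--     Examples:
--         maxSpan([1, 2, 1, 1, 3]) → 4
--         maxSpan([1, 4, 2, 1, 4, 1, 4]) → 6
--         maxSpan([1, 4, 2, 1, 4, 4, 4]) → 6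
--
--     Instructions to run the tests via the CLI:
--         1. Open your terminal or command prompt.
--         2. Run the tests by executing: `python async-ap/q29.py`
--
--     Args:
--         nums (list[int]): The input list of integers.
--
--     Returns:
--         int: The largest span found in the array.
--     """
--     ### [Your Implementation Here]
--
--     # Case-1. If the question can be solved with 'iteration (for/while)',
--     # design the most efficient algorithm.
--
--     if len(nums) == 0:
--         return 0
--
--     if len(nums) == len(list(set(nums))):
--         return 1
--
--
--     i = 0
--     current_span = 0
--     while i < len(nums):
--         j = i + 1
--         new_span = 0
--         start_span_ind = i
--         end_span_ind = j
--         while j < len(nums):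
--             if nums[j] == nums[i]:
--                 if j != end_span_ind:
--                     end_span_ind = j
--             j += 1
--         new_span = end_span_ind - start_span_ind + 1
--         if current_span < new_span:
--             current_span = new_span
--         i += 1
--     return current_span
-- ===== SOURCE B (Python) =====
-- def maxSpan(nums: list[int]) -> int:
--     first = {}
--     span = 0
--     for i, v in enumerate(nums):
--         if v not in first:
--             first[v] = i
--         s = i - first[v] + 1
--         if s > span:
--             span = s
--     return span
-- ===== Notes on version B (the rewrite author's own statement) =====
-- stated objective: faster
-- what changed: Replaced A's O(n^2) nested index scan (for each i, rescan the rest of the list for the last equal element) by a single pass over enumerate(nums) that records each value's first-seen index in a dict and tracks the running maximum of i - first[v] + 1.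
import Mathlib
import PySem

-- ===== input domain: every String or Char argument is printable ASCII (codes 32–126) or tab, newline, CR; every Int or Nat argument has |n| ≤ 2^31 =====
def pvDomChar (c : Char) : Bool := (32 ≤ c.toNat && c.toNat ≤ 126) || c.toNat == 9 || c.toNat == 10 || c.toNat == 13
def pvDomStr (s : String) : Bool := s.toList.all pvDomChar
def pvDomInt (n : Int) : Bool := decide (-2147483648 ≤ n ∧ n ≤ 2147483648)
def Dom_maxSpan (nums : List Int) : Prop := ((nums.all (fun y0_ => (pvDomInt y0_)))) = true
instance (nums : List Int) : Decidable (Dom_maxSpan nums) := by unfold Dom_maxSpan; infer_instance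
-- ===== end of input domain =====

-- B replaces A's quadratic nested scan by a single pass with a dict of first-seen indices (objective: faster).

-- ===== PORT A =====
-- A's inner while-loop: scan j from i+1, remember the last j with nums[j] == nums[i].
-- nums[j] (always 0 ≤ j < len(nums) here) is List.getD.
def maxSpanInnerA (nums : List Int) (vi : Int) (j : Nat) (e : Int) : Int :=
  if _h : j < nums.length then
    maxSpanInnerA nums vi (j + 1)
      (if nums.getD j 0 = vi then (if (j : Int) ≠ e then (j : Int) else e) else e)
  else e
termination_by nums.length - j

-- A's outer while-loop over i, keeping current_span.
def maxSpanOuterA (nums : List Int) (i : Nat) (cur : Int) : Int :=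
  if _h : i < nums.length then
    let endIdx := maxSpanInnerA nums (nums.getD i 0) (i + 1) ((i : Int) + 1)
    let newSpan := endIdx - (i : Int) + 1
    maxSpanOuterA nums (i + 1) (if cur < newSpan then newSpan else cur)
  else cur
termination_by nums.length - i

def maxSpan (nums : List Int) : Int :=
  if nums.length = 0 then 0
  else if nums.length = (PySem.Set.ofList nums).length then 1
  else maxSpanOuterA nums 0 0

-- ===== PORT B =====
-- B: one pass over enumerate(nums), state = (dict of first-seen index per value, best span).
def maxSpan_alt (nums : List Int) : Int :=
  ((PySem.List.enumerate nums 0).foldl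
    (fun (st : PySem.Dict Int Int × Int) p =>
      let first := if st.1.contains p.2 then st.1 else st.1.insert p.2 p.1
      let s := p.1 - first.getD p.2 0 + 1
      (first, if st.2 < s then s else st.2))
    (PySem.Dict.empty, 0)).2

-- ===== PRECONDITION & SPEC =====
def Spec_maxSpan (nums : List Int) (out : Int) : Prop := out = maxSpan_alt nums
instance (nums : List Int) (out : Int) : Decidable (Spec_maxSpan nums out) := by unfold Spec_maxSpan; infer_instance

-- ===== CLAIM (what is proved, stated in full; the proofs are below) =====
def Claim_equal_maxSpan : Prop := ∀ (nums : List Int), Dom_maxSpan nums → Spec_maxSpan nums (maxSpan nums)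

-- ===== LEMMAS AND PROOFS =====

-- useful general fact: "if a < b then b else a" is max
lemma if_lt_max (a b : Int) : (if a < b then b else a) = max a b := by
  rw [max_def]; split_ifs <;> omega

-- upper bound for foldl max
lemma foldl_max_le (l : List Int) : ∀ (a M : Int), a ≤ M → (∀ y ∈ l, y ≤ M) →
    l.foldl max a ≤ M := by
  induction l with
  | nil => intro a M ha _; simpa using ha
  | cons x t ih =>
      intro a M ha h
      simp only [List.foldl_cons]
      exact ih _ M (max_le ha (h x (by simp))) (fun y hy => h y (by simp [hy]))

-- A-side abstraction -------------------------------------------------------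

-- the inner loop's step function (the "if j != e then j else e" no-op removed)
def gA (nums : List Int) (vi : Int) (e : Int) (k : Nat) : Int :=
  if nums.getD k 0 = vi then (k : Int) else e

def endA (nums : List Int) (i : Nat) : Int :=
  (List.range' (i + 1) (nums.length - (i + 1))).foldl (gA nums (nums.getD i 0)) ((i : Int) + 1)

def termA (nums : List Int) (i : Nat) : Int := endA nums i - (i : Int) + 1

def Aspec (nums : List Int) : Int :=
  ((List.range nums.length).map (termA nums)).foldl max 0

-- B-side abstraction -------------------------------------------------------

def termB (nums : List Int) (k : Nat) : Int :=
  (k : Int) - (List.idxOf (nums.getD k 0) nums : Int) + 1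

def Bspec (nums : List Int) : Int :=
  ((List.range nums.length).map (termB nums)).foldl max 0

def stepB : PySem.Dict Int Int × Int → Int × Int → PySem.Dict Int Int × Int :=
  fun st p =>
    let first := if st.1.contains p.2 then st.1 else st.1.insert p.2 p.1
    let s := p.1 - first.getD p.2 0 + 1
    (first, if st.2 < s then s else st.2)

def firstD (nums : List Int) : PySem.Dict Int Int :=
  (PySem.List.enumerate nums 0).foldl
    (fun d p => if d.contains p.2 then d else d.insert p.2 p.1) PySem.Dict.empty

-- A's inner loop is a fold of gA over the remaining indices
lemma innerA_eq (nums : List Int) (vi : Int) (j : Nat) (e : Int) :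
    maxSpanInnerA nums vi j e
      = (List.range' j (nums.length - j)).foldl (gA nums vi) e := by
  rw [maxSpanInnerA]
  by_cases h : j < nums.length
  · simp only [h, dite_true]
    rw [innerA_eq nums vi (j + 1)]
    have hr : nums.length - j = (nums.length - (j + 1)) + 1 := by omega
    rw [hr, List.range'_succ, List.foldl_cons]
    congr 1
    simp only [gA]
    split_ifs with h1 h2 <;> first | rfl | omega
  · simp only [h, dite_false]
    have hz : nums.length - j = 0 := by omega
    simp [hz]
termination_by nums.length - j

-- A's outer loop is a fold of max ∘ termA over the remaining indices
lemma outerA_eq (nums : List Int) (i : Nat) (cur : Int) :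
    maxSpanOuterA nums i cur
      = ((List.range' i (nums.length - i)).map (termA nums)).foldl max cur := by
  rw [maxSpanOuterA]
  by_cases h : i < nums.length
  · simp only [h, dite_true]
    rw [outerA_eq nums (i + 1)]
    have hr : nums.length - i = (nums.length - (i + 1)) + 1 := by omega
    rw [hr, List.range'_succ, List.map_cons, List.foldl_cons]
    congr 1
    rw [innerA_eq, if_lt_max]
    rfl
  · simp only [h, dite_false]
    have hz : nums.length - i = 0 := by omega
    simp [hz]
termination_by nums.length - i

lemma maxSpan_loop_eq (nums : List Int) : maxSpanOuterA nums 0 0 = Aspec nums := by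
  rw [outerA_eq, Aspec, List.range_eq_range']
  simp

-- B-side: peeling the last element off the folds
lemma enumerate_concat (ys : List Int) (x : Int) :
    PySem.List.enumerate (ys ++ [x]) 0
      = PySem.List.enumerate ys 0 ++ [((ys.length : Int), x)] := by
  rw [PySem.List.enumerate_append]
  simp [PySem.List.enumerate_cons, PySem.List.enumerate_nil]

lemma firstD_append (ys : List Int) (x : Int) :
    firstD (ys ++ [x])
      = (if (firstD ys).contains x then firstD ys
         else (firstD ys).insert x (ys.length : Int)) := by
  rw [firstD, enumerate_concat, List.foldl_append]
  rfl

lemma firstD_contains (nums : List Int) (v : Int) :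
    (firstD nums).contains v = true ↔ v ∈ nums := by
  induction nums using List.reverseRecOn with
  | nil => simp [firstD, PySem.List.enumerate_nil, PySem.Dict.contains_empty]
  | append_singleton ys x ih =>
      rw [firstD_append]
      by_cases hc : (firstD ys).contains x
      · rw [if_pos hc, ih]
        constructor
        · intro h; exact List.mem_append_left _ h
        · intro h
          rcases List.mem_append.mp h with h | h
          · exact h
          · simp at h; subst h; exact ih.mp hc
      · rw [if_neg hc, PySem.Dict.contains_insert]
        rcases eq_or_ne v x with rfl | hne
        · simp
        · simp [hne, ih]

lemma firstD_getD (nums : List Int) (v : Int) (h : v ∈ nums) :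
    (firstD nums).getD v 0 = (List.idxOf v nums : Int) := by
  induction nums using List.reverseRecOn with
  | nil => simp at h
  | append_singleton ys x ih =>
      rw [firstD_append]
      by_cases hc : (firstD ys).contains x
      · have hx : x ∈ ys := (firstD_contains ys x).mp hc
        rw [if_pos hc]
        have hv : v ∈ ys := by
          rcases List.mem_append.mp h with h | h
          · exact h
          · simp at h; subst h; exact hx
        rw [ih hv, List.idxOf_append_of_mem hv]
      · have hx : x ∉ ys := fun hm => hc ((firstD_contains ys x).mpr hm)
        rw [if_neg hc, PySem.Dict.getD_insert]
        rcases eq_or_ne v x with rfl | hne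
        · rw [if_pos rfl, List.idxOf_append]
          simp [hx]
        · have hv : v ∈ ys := by
            rcases List.mem_append.mp h with h | h
            · exact h
            · simp at h; exact absurd h hne
          rw [if_neg hne, ih hv, List.idxOf_append_of_mem hv]

lemma getD_concat_left (ys : List Int) (x : Int) (k : Nat) (h : k < ys.length) :
    (ys ++ [x]).getD k 0 = ys.getD k 0 := by
  rw [List.getD_eq_getElem _ _ (by simp; omega), List.getD_eq_getElem _ _ h]
  exact List.getElem_append_left h

lemma termB_prefix (ys : List Int) (x : Int) (k : Nat) (hk : k < ys.length) :
    termB (ys ++ [x]) k = termB ys k := by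
  unfold termB
  rw [getD_concat_left ys x k hk]
  have hv : ys.getD k 0 ∈ ys := by
    rw [List.getD_eq_getElem _ _ hk]; exact List.getElem_mem hk
  rw [List.idxOf_append_of_mem hv]

lemma Bspec_append (ys : List Int) (x : Int) :
    Bspec (ys ++ [x]) = max (Bspec ys) (termB (ys ++ [x]) ys.length) := by
  unfold Bspec
  rw [List.length_append]
  simp only [List.length_cons, List.length_nil]
  rw [List.range_succ, List.map_append, List.foldl_append]
  simp only [List.map_cons, List.map_nil, List.foldl_cons, List.foldl_nil]
  congr 1
  rw [List.foldl_map, List.foldl_map]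
  exact PySem.List.foldl_congr_mem _ _ _ _
    (fun acc k hk => by rw [termB_prefix ys x k (List.mem_range.mp hk)])

lemma B_inv (nums : List Int) :
    (PySem.List.enumerate nums 0).foldl stepB (PySem.Dict.empty, 0)
      = (firstD nums, Bspec nums) := by
  induction nums using List.reverseRecOn with
  | nil => rfl
  | append_singleton ys x ih =>
      rw [enumerate_concat, List.foldl_append, ih]
      have hx : x ∈ ys ++ [x] := by simp
      have hgd : (firstD (ys ++ [x])).getD x 0 = (List.idxOf x (ys ++ [x]) : Int) :=
        firstD_getD _ _ hx
      have hvx : (ys ++ [x]).getD ys.length 0 = x := by simp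
      have hterm : ((ys.length : Int) - (firstD (ys ++ [x])).getD x 0 + 1)
          = termB (ys ++ [x]) ys.length := by
        unfold termB; rw [hvx, hgd]
      rw [Bspec_append]
      show stepB (firstD ys, Bspec ys) ((ys.length : Int), x) = _
      rw [stepB]
      simp only [← firstD_append ys x]
      rw [hterm, if_lt_max]

lemma alt_eq_Bspec (nums : List Int) : maxSpan_alt nums = Bspec nums := by
  have : maxSpan_alt nums
      = ((PySem.List.enumerate nums 0).foldl stepB (PySem.Dict.empty, 0)).2 := rfl
  rw [this, B_inv]

-- the gA fold returns its seed or one of the matching indices it visited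
lemma gA_result (nums : List Int) (vi : Int) :
    ∀ (l : List Nat) (e : Int),
      l.foldl (gA nums vi) e = e ∨
        ∃ k ∈ l, nums.getD k 0 = vi ∧ l.foldl (gA nums vi) e = (k : Int) := by
  intro l
  induction l with
  | nil => intro e; left; rfl
  | cons a t ih =>
      intro e
      simp only [List.foldl_cons]
      rcases ih (gA nums vi e a) with h | ⟨k, hk, hp, hres⟩
      · rw [h]
        unfold gA
        split_ifs with hpa
        · right; exact ⟨a, by simp, hpa, rfl⟩
        · left; rfl
      · right; exact ⟨k, List.mem_cons_of_mem _ hk, hp, hres⟩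

-- on an ascending index list the gA fold never drops below a lower bound of the seed
lemma gA_mono (nums : List Int) (vi : Int) :
    ∀ (l : List Nat), l.Pairwise (· < ·) → ∀ e : Int,
      (∀ k ∈ l, e ≤ (k : Int)) → e ≤ l.foldl (gA nums vi) e := by
  intro l
  induction l with
  | nil => intro _ e _; simp
  | cons a t ih =>
      intro hp e he
      rw [List.pairwise_cons] at hp
      simp only [List.foldl_cons]
      have h1 : e ≤ gA nums vi e a := by
        unfold gA; split_ifs
        · exact he a (by simp)
        · exact le_refl e
      have h2 : ∀ k ∈ t, gA nums vi e a ≤ (k : Int) := by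
        intro k hk
        unfold gA; split_ifs
        · exact_mod_cast le_of_lt (hp.1 k hk)
        · exact he k (List.mem_cons_of_mem _ hk)
      exact le_trans h1 (ih hp.2 _ h2)

-- on an ascending index list the gA fold ends at or above every matching index
lemma gA_ge_hit (nums : List Int) (vi : Int) :
    ∀ (l : List Nat), l.Pairwise (· < ·) → ∀ (e : Int) (k : Nat),
      k ∈ l → nums.getD k 0 = vi → (k : Int) ≤ l.foldl (gA nums vi) e := by
  intro l
  induction l with
  | nil => intro _ e k hk; exact absurd hk (List.not_mem_nil)
  | cons a t ih =>
      intro hp e k hk hpk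
      rw [List.pairwise_cons] at hp
      simp only [List.foldl_cons]
      rcases List.mem_cons.mp hk with rfl | hkt
      · have ha : gA nums vi e k = (k : Int) := by unfold gA; rw [if_pos hpk]
        rw [ha]
        exact gA_mono nums vi t hp.2 _
          (fun j hj => by exact_mod_cast le_of_lt (hp.1 j hj))
      · exact ih hp.2 _ k hkt hpk

-- the first occurrence of xs[k] is at or before k
lemma idxOf_le (xs : List Int) (k : Nat) (h : k < xs.length) :
    List.idxOf xs[k] xs ≤ k := by
  have hl : k < (xs.take (k + 1)).length := by simp [List.length_take]; omega
  have hmem : xs[k] ∈ xs.take (k + 1) := by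
    have hg : (xs.take (k + 1))[k] = xs[k] := List.getElem_take
    exact hg ▸ List.getElem_mem hl
  have hlt : List.idxOf xs[k] (xs.take (k + 1)) < (xs.take (k + 1)).length :=
    List.idxOf_lt_length_iff.mpr hmem
  have heq : List.idxOf xs[k] (xs.take (k + 1) ++ xs.drop (k + 1))
      = List.idxOf xs[k] (xs.take (k + 1)) := List.idxOf_append_of_mem hmem
  rw [List.take_append_drop] at heq
  simp [List.length_take] at hlt
  omega

-- a list with a repeated value has a position whose value first occurs strictly earlier
lemma dup_exists (xs : List Int) (h : ¬ xs.Nodup) :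
    ∃ q, ∃ _ : q < xs.length, List.idxOf xs[q] xs < q := by
  by_contra hq
  simp only [not_exists, not_lt] at hq
  apply h
  rw [List.nodup_iff_injective_getElem]
  intro i j hij
  have hi : List.idxOf xs[(i : Nat)] xs = (i : Nat) :=
    le_antisymm (idxOf_le xs i i.2) (hq i i.2)
  have hj : List.idxOf xs[(j : Nat)] xs = (j : Nat) :=
    le_antisymm (idxOf_le xs j j.2) (hq j j.2)
  apply Fin.ext
  rw [← hi, ← hj]
  simp only at hij
  rw [hij]

lemma zero_le_Bspec (nums : List Int) : 0 ≤ Bspec nums :=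
  (PySem.List.le_foldl_max _ 0).1

lemma zero_le_Aspec (nums : List Int) : 0 ≤ Aspec nums :=
  (PySem.List.le_foldl_max _ 0).1

lemma termB_le_Bspec (nums : List Int) (k : Nat) (hk : k < nums.length) :
    termB nums k ≤ Bspec nums :=
  (PySem.List.le_foldl_max _ 0).2 _ (List.mem_map_of_mem (List.mem_range.mpr hk))

lemma termA_le_Aspec (nums : List Int) (i : Nat) (hi : i < nums.length) :
    termA nums i ≤ Aspec nums :=
  (PySem.List.le_foldl_max _ 0).2 _ (List.mem_map_of_mem (List.mem_range.mpr hi))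

lemma two_le_Bspec (nums : List Int) (hnd : ¬ nums.Nodup) : 2 ≤ Bspec nums := by
  obtain ⟨q, hq, hlt⟩ := dup_exists nums hnd
  have ht : 2 ≤ termB nums q := by
    unfold termB
    rw [List.getD_eq_getElem _ _ hq]
    omega
  exact le_trans ht (termB_le_Bspec nums q hq)

lemma two_le_termA (nums : List Int) (i : Nat) (_hi : i < nums.length) :
    2 ≤ termA nums i := by
  unfold termA endA
  have hm : ((i : Int) + 1)
      ≤ (List.range' (i + 1) (nums.length - (i + 1))).foldl
          (gA nums (nums.getD i 0)) ((i : Int) + 1) := by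
    apply gA_mono nums _ _ (List.pairwise_lt_range' 1)
    intro k hk
    have h1 := (List.mem_range'_1.mp hk).1
    omega
  omega

lemma termA_le_Bspec (nums : List Int) (hnd : ¬ nums.Nodup) (i : Nat)
    (hi : i < nums.length) : termA nums i ≤ Bspec nums := by
  unfold termA endA
  rcases gA_result nums (nums.getD i 0)
      (List.range' (i + 1) (nums.length - (i + 1))) ((i : Int) + 1) with h | ⟨k, hk, hpk, hres⟩
  · rw [h]
    have := two_le_Bspec nums hnd
    omega
  · rw [hres]
    obtain ⟨h1, h2⟩ := List.mem_range'_1.mp hk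
    have hk2 : k < nums.length := by omega
    have hidx : List.idxOf (nums.getD k 0) nums ≤ i := by
      rw [List.getD_eq_getElem _ _ hk2] at hpk ⊢
      rw [hpk, List.getD_eq_getElem _ _ hi]
      exact idxOf_le nums i hi
    have hb := termB_le_Bspec nums k hk2
    unfold termB at hb
    omega

lemma termB_le_Aspec (nums : List Int) (h0 : nums ≠ []) (q : Nat)
    (hq : q < nums.length) : termB nums q ≤ Aspec nums := by
  have hlen : 0 < nums.length := List.length_pos_iff.mpr h0
  have hmemq : nums[q] ∈ nums := List.getElem_mem hq
  have hflt : List.idxOf nums[q] nums < nums.length := List.idxOf_lt_length_iff.mpr hmemq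
  have hfle : List.idxOf nums[q] nums ≤ q := idxOf_le nums q hq
  rcases eq_or_lt_of_le hfle with heq | hlt
  · have ht : termB nums q = 1 := by
      unfold termB
      rw [List.getD_eq_getElem _ _ hq, heq]
      ring
    have h2 := two_le_termA nums 0 hlen
    have hA := termA_le_Aspec nums 0 hlen
    omega
  · have hval : nums[List.idxOf nums[q] nums] = nums[q] := List.getElem_idxOf hflt
    have hgd : nums.getD q 0 = nums.getD (List.idxOf nums[q] nums) 0 := by
      rw [List.getD_eq_getElem _ _ hq, List.getD_eq_getElem _ _ hflt, hval]
    have hhit : (q : Int) ≤ endA nums (List.idxOf nums[q] nums) := by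
      unfold endA
      apply gA_ge_hit nums _ _ (List.pairwise_lt_range' 1) _ q
      · exact List.mem_range'_1.mpr ⟨by omega, by omega⟩
      · exact hgd
    have hAf : termA nums (List.idxOf nums[q] nums) ≤ Aspec nums :=
      termA_le_Aspec nums _ (by omega)
    have ht : termB nums q = (q : Int) - (List.idxOf nums[q] nums : Int) + 1 := by
      unfold termB
      rw [List.getD_eq_getElem _ _ hq]
    unfold termA at hAf
    omega

lemma Aspec_eq_Bspec (nums : List Int) (h0 : nums ≠ []) (hnd : ¬ nums.Nodup) :
    Aspec nums = Bspec nums := by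
  apply le_antisymm
  · unfold Aspec
    apply foldl_max_le _ _ _ (zero_le_Bspec nums)
    intro y hy
    rcases List.mem_map.mp hy with ⟨i, hi, rfl⟩
    exact termA_le_Bspec nums hnd i (List.mem_range.mp hi)
  · unfold Bspec
    apply foldl_max_le _ _ _ (zero_le_Aspec nums)
    intro y hy
    rcases List.mem_map.mp hy with ⟨q, hqr, rfl⟩
    exact termB_le_Aspec nums h0 q (List.mem_range.mp hqr)

-- len(list(set(nums))) == len(nums) says exactly that nums has no duplicates
lemma ofList_length_le (xs : List Int) : (PySem.Set.ofList xs).length ≤ xs.length := by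
  induction xs with
  | nil => simp [PySem.Set.ofList_eq_foldl]
  | cons x t ih =>
      rw [PySem.Set.ofList_cons]
      simp only [List.length_cons]
      have hd : ((PySem.Set.ofList t).discard x).length ≤ (PySem.Set.ofList t).length := by
        unfold PySem.Set.discard
        exact List.length_filter_le _ _
      omega

lemma ofList_length_iff (xs : List Int) :
    (PySem.Set.ofList xs).length = xs.length ↔ xs.Nodup := by
  induction xs with
  | nil => simp [PySem.Set.ofList_eq_foldl]
  | cons x t ih =>
      rw [PySem.Set.ofList_cons, List.nodup_cons]
      simp only [List.length_cons]
      constructor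
      · intro h
        have hle := ofList_length_le t
        have hdle : ((PySem.Set.ofList t).discard x).length
            ≤ (PySem.Set.ofList t).length := by
          unfold PySem.Set.discard
          exact List.length_filter_le _ _
        have heq1 : ((PySem.Set.ofList t).discard x).length = t.length := by omega
        have heq2 : (PySem.Set.ofList t).length = t.length := by omega
        refine ⟨?_, ih.mp heq2⟩
        intro hx
        have hx' : x ∈ PySem.Set.ofList t := (PySem.Set.mem_ofList t x).mpr hx
        have hall : ∀ y ∈ PySem.Set.ofList t, (!(y == x)) = true := by
          apply List.length_filter_eq_length_iff.mp
          unfold PySem.Set.discard at heq1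
          omega
        have := hall x hx'
        simp at this
      · rintro ⟨hx, hnd⟩
        have hx' : x ∉ PySem.Set.ofList t := fun hm => hx ((PySem.Set.mem_ofList t x).mp hm)
        have hde : (PySem.Set.ofList t).discard x = PySem.Set.ofList t := by
          unfold PySem.Set.discard
          apply List.filter_eq_self.mpr
          intro y hy
          simp only [Bool.not_eq_eq_eq_not, Bool.not_true, beq_eq_false_iff_ne, ne_eq]
          rintro rfl
          exact hx' hy
        rw [hde, ih.mpr hnd]

lemma Bspec_nodup (nums : List Int) (h0 : nums ≠ []) (hnd : nums.Nodup) :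
    Bspec nums = 1 := by
  have hlen : 0 < nums.length := List.length_pos_iff.mpr h0
  have hterm : ∀ k, k < nums.length → termB nums k = 1 := by
    intro k hk
    unfold termB
    rw [List.getD_eq_getElem _ _ hk, List.Nodup.idxOf_getElem hnd k hk]
    ring
  apply le_antisymm
  · unfold Bspec
    apply foldl_max_le _ _ _ (by norm_num)
    intro y hy
    rcases List.mem_map.mp hy with ⟨k, hkr, rfl⟩
    rw [hterm k (List.mem_range.mp hkr)]
  · have hb := termB_le_Bspec nums 0 hlen
    rw [hterm 0 hlen] at hb
    exact hb

-- ===== VERDICT (by name: the statement is the Claim_ definition above) =====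
theorem maxSpan_spec : Claim_equal_maxSpan := by
  intro nums _
  unfold Spec_maxSpan
  rw [alt_eq_Bspec]
  unfold maxSpan
  by_cases h0 : nums.length = 0
  · rw [if_pos h0]
    have hnil : nums = [] := List.length_eq_zero_iff.mp h0
    subst hnil
    rfl
  · rw [if_neg h0]
    have hne : nums ≠ [] := fun h => h0 (by simp [h])
    by_cases hnd : nums.length = (PySem.Set.ofList nums).length
    · rw [if_pos hnd, Bspec_nodup nums hne ((ofList_length_iff nums).mp hnd.symm)]
    · rw [if_neg hnd, maxSpan_loop_eq]
      exact Aspec_eq_Bspec nums hne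
        (fun hh => hnd ((ofList_length_iff nums).mpr hh).symm)
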